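-- pv_equiv track=rewrite | github.com/Jimmy1106/KKBOX_codility_test_reviewing | Task1_findSubMsgByLength.py | findSubMsgByLength
-- ===== SOURCE A (Python) =====
-- def findSubMsgByLength(message, length):
--     sub_msg = None
--
--     if len(message)<=length:
--         return message
--     if message[length]==" ":
--         return message[:(length)]
--
--     buffer = ""
--     # for i,c in enumerate(message):
--     for i in range(length):
--         if message[i]==" ":
--             sub_msg = "".join(buffer)
--         buffer += message[i]
--
--     return sub_msg
-- ===== SOURCE B (Python) =====
-- def findSubMsgByLength(message, length):
--     if len(message) <= length:
--         return message
--     if message[length] == " ":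
--         return message[:length]
--     for i in range(length - 1, -1, -1):
--         if message[i] == " ":
--             return message[:i]
--     return None
-- ===== Notes on version B (the rewrite author's own statement) =====
-- stated objective: faster
-- what changed: Replaces A's forward scan over range(length) that maintains a growing character buffer and a last-space snapshot with a backward scan from length-1 that returns message[:i] at the first space found from the right, keeping no accumulator.
import Mathlib
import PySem

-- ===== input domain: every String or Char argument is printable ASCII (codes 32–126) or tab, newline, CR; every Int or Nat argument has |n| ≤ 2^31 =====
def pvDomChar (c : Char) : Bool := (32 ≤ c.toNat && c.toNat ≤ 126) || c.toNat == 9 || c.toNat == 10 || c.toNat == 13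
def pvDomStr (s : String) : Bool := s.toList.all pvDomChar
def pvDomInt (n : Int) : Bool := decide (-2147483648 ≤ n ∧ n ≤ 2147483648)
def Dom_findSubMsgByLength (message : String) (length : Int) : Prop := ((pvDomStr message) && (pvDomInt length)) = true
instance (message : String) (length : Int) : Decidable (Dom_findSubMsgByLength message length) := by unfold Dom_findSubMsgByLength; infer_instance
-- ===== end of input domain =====

-- B replaces A's forward scan with a buffer by a backward early-return scan for the last space; same return values.

-- ===== PORT A =====
-- A: two guards, then a forward loop over range(length) keeping sub_msg (last space-prefix) and a char buffer.
def findSubMsgByLength (message : String) (length : Int) : Option String :=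
  if PySem.Str.len message ≤ length then some message
  else if PySem.Str.pyGet? message length = some ' ' then
    some (PySem.Str.slice message none (some length))
  else
    ((PySem.List.pyRange 0 length 1).foldl
      (fun (st : Option String × List Char) i =>
        match PySem.List.pyGet? message.toList i with
        | some c => (if c = ' ' then some (String.ofList st.2) else st.1, st.2 ++ [c])
        | none => st)  -- unreachable: every i in range(length) indexes into message here
      (none, [])).1

-- ===== PORT B =====
-- B: the same two guards, then a backward scan returning at the first space found from the right.
def findSubMsgByLength_alt (message : String) (length : Int) : Option String :=
  if PySem.Str.len message ≤ length then some message
  else if PySem.Str.pyGet? message length = some ' ' then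
    some (PySem.Str.slice message none (some length))
  else
    (PySem.List.pyRange (length - 1) (-1) (-1)).findSome? (fun i =>
      if PySem.List.pyGet? message.toList i = some ' ' then
        some (PySem.Str.slice message none (some i))
      else none)

-- ===== PRECONDITION & SPEC =====
-- Pre_ excludes length < -len(message): there Python A raises IndexError on message[length] (B raises identically).
def Pre_findSubMsgByLength (message : String) (length : Int) : Prop :=
  -(message.toList.length : Int) ≤ length
instance (message : String) (length : Int) : Decidable (Pre_findSubMsgByLength message length) := by
  unfold Pre_findSubMsgByLength; infer_instance

def pvWitness_findSubMsgByLength : String × Int := ("hello world now", 8)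

def Spec_findSubMsgByLength (message : String) (length : Int) (out : Option String) : Prop := out = findSubMsgByLength_alt message length
instance (message : String) (length : Int) (out : Option String) : Decidable (Spec_findSubMsgByLength message length out) := by unfold Spec_findSubMsgByLength; infer_instance

-- ===== CLAIM (what is proved, stated in full; the proofs are below) =====
def Claim_equal_findSubMsgByLength : Prop := ∀ (message : String) (length : Int), Dom_findSubMsgByLength message length → Pre_findSubMsgByLength message length → Spec_findSubMsgByLength message length (findSubMsgByLength message length)

-- ===== LEMMAS AND PROOFS =====

lemma pyRange_empty_of_nonpos {a : Int} (h : a ≤ 0) : PySem.List.pyRange 0 a 1 = [] := by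
  simp [PySem.List.pyRange]
  intro h2; omega

lemma pyRangeDesc_empty_of_nonpos {a : Int} (h : a ≤ 0) :
    PySem.List.pyRange (a - 1) (-1) (-1) = [] := by
  simp [PySem.List.pyRange]
  intro h2; omega

lemma pyRangeDesc_formula (n : Nat) :
    PySem.List.pyRange ((n : Int) - 1) (-1) (-1) = (List.range n).map (fun k : Nat => (n : Int) - 1 - (k : Int)) := by
  rcases Nat.eq_zero_or_pos n with h | h
  · subst h; simp [PySem.List.pyRange]
  · simp only [PySem.List.pyRange]
    rw [if_neg (by norm_num)]
    have hc : ((-1 : Int) < (n:Int) - 1) := by omega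
    rw [if_neg (by norm_num), if_pos hc]
    have h1 : ((n:Int) - 1 - -1 + - -1 - 1) / - -1 = (n:Int) := by norm_num
    rw [h1, Int.toNat_natCast]
    apply List.map_congr_left
    intro k _
    ring

-- B's descending range grows at the head as length grows by one
lemma pyRangeDesc_succ (n : Nat) :
    PySem.List.pyRange ((↑(n+1) : Int) - 1) (-1) (-1) = (n : Int) :: PySem.List.pyRange ((n : Int) - 1) (-1) (-1) := by
  rw [pyRangeDesc_formula, pyRangeDesc_formula, List.range_succ_eq_map]
  simp only [List.map_cons, List.map_map]
  congr 1
  · push_cast; ring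
  · apply List.map_congr_left
    intro a _
    simp only [Function.comp_apply, Nat.succ_eq_add_one]
    push_cast; ring

-- core correspondence: A's fold over [0..n-1] computes (B's backward findSome?, the first n chars)
lemma fold_eq_findSome (message : String) (n : Nat) (h : n ≤ message.toList.length) :
    (((List.range n).map (fun (k : Nat) => (k : Int))).foldl
      (fun (st : Option String × List Char) i =>
        match PySem.List.pyGet? message.toList i with
        | some c => (if c = ' ' then some (String.ofList st.2) else st.1, st.2 ++ [c])
        | none => st)
      (none, [])) =
    ( (PySem.List.pyRange ((n : Int) - 1) (-1) (-1)).findSome? (fun i =>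
        if PySem.List.pyGet? message.toList i = some ' ' then
          some (PySem.Str.slice message none (some i))
        else none)
    , message.toList.take n ) := by
  induction n with
  | zero =>
      rw [pyRangeDesc_empty_of_nonpos (by norm_num)]
      simp
  | succ n ih =>
      have hn : n ≤ message.toList.length := by omega
      have hlt : n < message.toList.length := by omega
      rw [List.range_succ, List.map_append, List.foldl_append, ih hn,
          pyRangeDesc_succ, List.findSome?_cons]
      have hget : PySem.List.pyGet? message.toList (n : Int) = some (message.toList[n]) := by
        rw [PySem.List.pyGet?_natCast, List.getElem?_eq_getElem hlt]
      simp only [List.foldl_cons, List.foldl_nil, List.map_cons, List.map_nil, hget]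
      have htake : message.toList.take (n + 1) = message.toList.take n ++ [message.toList[n]] := by
        rw [List.take_add_one]
        simp [List.getElem?_eq_getElem hlt]
      by_cases hsp : message.toList[n] = ' '
      · rw [if_pos hsp, if_pos (by rw [hsp])]
        have hslice : PySem.Str.slice message none (some (n : Int)) = String.ofList (message.toList.take n) := by
          apply String.toList_injective
          rw [PySem.Str.toList_slice, PySem.Chars.slice_eq_listSlice,
              PySem.List.slice_to _ (Int.natCast_nonneg n), Int.toNat_natCast]
          simp
        rw [hslice, htake, hsp]
      · rw [if_neg hsp, if_neg (by simp [hsp])]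
        rw [htake]

-- ===== VERDICT (by name: the statement is the Claim_ definition above) =====
theorem findSubMsgByLength_spec : Claim_equal_findSubMsgByLength := by
  intro message length _ _
  unfold Spec_findSubMsgByLength findSubMsgByLength findSubMsgByLength_alt
  split_ifs with h1 h2
  · rfl
  · rfl
  · rcases lt_or_ge length 0 with hneg | hge
    · rw [pyRange_empty_of_nonpos (le_of_lt hneg), pyRangeDesc_empty_of_nonpos (le_of_lt hneg)]
      rfl
    · lift length to Nat using hge with n
      have hn : n ≤ message.toList.length := by
        have : PySem.Str.len message = (message.toList.length : Int) := by
          simp [PySem.Str.len]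
        omega
      rw [PySem.List.pyRange_zero_natCast, fold_eq_findSome message n hn]
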